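-- pv_equiv track=rewrite | github.com/ilialecha/Programming_1 | Lists/List_8/program(5).py | is_power7
-- ===== SOURCE A (Python) =====
-- def is_power7(n):
--     if n == 0:
--         return False
--     while n != 1:
--         if n%7 != 0:
--             return False
--         n = n//7
--     return True
-- ===== SOURCE B (Python) =====
-- def is_power7(n):
--     p = 1
--     while p < n:
--         p *= 7
--     return p == n
-- ===== Notes on version B (the rewrite author's own statement) =====
-- stated objective: simpler
-- what changed: B multiplies a running power of 7 upward until it reaches n and compares, instead of A's downward floor-division/modulo loop; zero and negatives fall out naturally.
import Mathlib
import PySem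

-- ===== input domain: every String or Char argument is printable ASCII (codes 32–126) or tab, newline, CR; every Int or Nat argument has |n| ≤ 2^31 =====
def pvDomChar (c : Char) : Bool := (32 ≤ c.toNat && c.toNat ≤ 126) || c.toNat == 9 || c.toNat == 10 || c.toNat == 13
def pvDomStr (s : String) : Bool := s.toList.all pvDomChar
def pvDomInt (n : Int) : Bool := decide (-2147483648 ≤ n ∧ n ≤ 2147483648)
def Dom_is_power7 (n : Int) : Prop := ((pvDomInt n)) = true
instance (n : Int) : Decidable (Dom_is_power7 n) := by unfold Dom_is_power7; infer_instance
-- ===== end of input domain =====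

-- B builds the powers of 7 upward with a running product and compares, instead of A's
-- downward modulo/floor-division loop; objective: simpler.


-- ===== PORT A =====
-- A's while loop; the n = 0 branch is a termination guard only (it is unreachable from
-- is_power7, which returns False for n = 0 before entering the loop).
def pow7LoopA (n : Int) : Bool :=
  if n = 1 then true
  else if PySem.Int.mod n 7 ≠ 0 then false
  else if _h : n = 0 then false
  else pow7LoopA (PySem.Int.floordiv n 7)
termination_by n.natAbs
decreasing_by
  have hd : (7 : Int) ∣ n := (PySem.Int.mod_eq_zero_iff_dvd n 7).mp (by omega)
  obtain ⟨m, rfl⟩ := hd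
  rw [PySem.Int.floordiv_eq_ediv_of_pos (by norm_num), Int.mul_ediv_cancel_left _ (by norm_num)]
  have hm : m ≠ 0 := by rintro rfl; simp_all
  simp [Int.natAbs_mul]
  omega

def is_power7 (n : Int) : Bool :=
  if n = 0 then false else pow7LoopA n

-- ===== PORT B =====
-- B's while loop; the 0 < p conjunct is a termination guard only (p starts at 1 and only
-- grows, so it always holds on reachable states).
def pow7LoopB (n p : Int) : Bool :=
  if _h : 0 < p ∧ p < n then pow7LoopB n (p * 7)
  else decide (p = n)
termination_by (n - p).toNat
decreasing_by omega

def is_power7_alt (n : Int) : Bool := pow7LoopB n 1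

-- ===== PRECONDITION & SPEC =====
def Spec_is_power7 (n : Int) (out : Bool) : Prop := out = is_power7_alt n
instance (n : Int) (out : Bool) : Decidable (Spec_is_power7 n out) := by unfold Spec_is_power7; infer_instance

-- ===== CLAIM (what is proved, stated in full; the proofs are below) =====
def Claim_equal_is_power7 : Prop := ∀ (n : Int), Dom_is_power7 n → Spec_is_power7 n (is_power7 n)

-- ===== LEMMAS AND PROOFS =====

theorem pow7LoopB_char (n p : Int) (hp : 0 < p) :
    pow7LoopB n p = true ↔ ∃ k : Nat, n = p * 7 ^ k := by
  fun_induction pow7LoopB n p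
  case case1 =>
    next p h ih =>
    rw [ih (by positivity)]
    constructor
    · rintro ⟨k, rfl⟩; exact ⟨k + 1, by ring⟩
    · rintro ⟨k, rfl⟩
      cases k with
      | zero => simp at h
      | succ k => exact ⟨k, by ring⟩
  case case2 =>
    next p h =>
    simp only [decide_eq_true_eq]
    constructor
    · rintro rfl; exact ⟨0, by ring⟩
    · rintro ⟨k, rfl⟩
      cases k with
      | zero => ring
      | succ k =>
        exfalso
        have h7 : (7 : Int) ≤ 7 ^ (k + 1) :=
          calc (7 : Int) = 7 ^ 1 := by norm_num
          _ ≤ 7 ^ (k + 1) := pow_le_pow_right₀ (by norm_num) (by omega)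
        have hle : p * 7 ^ (k + 1) ≤ p := by
          rcases not_and_or.mp h with h' | h'
          · omega
          · omega
        nlinarith

theorem pow7LoopA_char (n : Int) (hn : n ≠ 0) :
    pow7LoopA n = true ↔ ∃ k : Nat, n = 7 ^ k := by
  fun_induction pow7LoopA n
  case case1 => exact ⟨fun _ => ⟨0, by norm_num⟩, fun _ => rfl⟩
  case case2 =>
    next m h1 h2 =>
    simp only [Bool.false_eq_true, false_iff]
    rintro ⟨k, rfl⟩
    apply h2
    cases k with
    | zero => exact absurd (by norm_num) h1
    | succ k =>
      have : (7 : Int) ^ (k + 1) = 7 * 7 ^ k := by ring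
      rw [this, PySem.Int.mod_eq_zero_iff_dvd]
      exact ⟨7 ^ k, by ring⟩
  case case3 => exact absurd rfl hn
  case case4 =>
    next x h1 h2 h3 ih =>
    have hd : (7 : Int) ∣ x := (PySem.Int.mod_eq_zero_iff_dvd x 7).mp (by omega)
    obtain ⟨m, rfl⟩ := hd
    have hfd : PySem.Int.floordiv (7 * m) 7 = m := by
      rw [PySem.Int.floordiv_eq_ediv_of_pos (by norm_num),
        Int.mul_ediv_cancel_left _ (by norm_num)]
    rw [hfd] at ih ⊢
    have hm : m ≠ 0 := by rintro rfl; simp_all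
    rw [ih hm]
    constructor
    · rintro ⟨k, rfl⟩; exact ⟨k + 1, by ring⟩
    · rintro ⟨k, hk⟩
      cases k with
      | zero => exfalso; apply h1; rw [hk]; norm_num
      | succ k =>
        refine ⟨k, ?_⟩
        have h7 : (7 : Int) * 7 ^ k = 7 * m := by rw [hk]; ring
        omega

-- ===== VERDICT (by name: the statement is the Claim_ definition above) =====
theorem is_power7_spec : Claim_equal_is_power7 := by
  intro n _
  unfold Spec_is_power7 is_power7 is_power7_alt
  by_cases hn : n = 0
  · subst hn
    rw [if_pos rfl, pow7LoopB]
    norm_num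
  · rw [if_neg hn, Bool.eq_iff_iff, pow7LoopA_char n hn, pow7LoopB_char n 1 (by norm_num)]
    simp
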